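-- pv_equiv track=rewrite | github.com/enabledornot/cryptography | vigenere_decode/vigenere.py | v_guess_length
-- ===== SOURCE A (Python) =====
-- def v_guess_length(message):
--     cycles = [0]
--     for offset in range(1,len(message)):
--         cycles.append(0)
--         for ii in range(0, len(message) - offset):
--             if message[ii] == message[offset+ii]:
--                 cycles[-1] += 1
--     return cycles.index(max(cycles)), cycles
-- ===== SOURCE B (Python) =====
-- def v_guess_length(message):
--     # Group equal characters: only positions holding the same character can
--     # coincide, so count, for each character, the differences of its
--     # occurrence positions (one pass with the previous occurrences per char).
--     n = len(message)
--     diffs = {}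
--     seen = {}
--     for j, ch in enumerate(message):
--         prev = seen.get(ch, [])
--         for i in prev:
--             d = j - i
--             diffs[d] = diffs.get(d, 0) + 1
--         seen[ch] = prev + [j]
--     cycles = [diffs.get(d, 0) for d in range(max(n, 1))]
--     return cycles.index(max(cycles)), cycles
-- ===== Notes on version B (the rewrite author's own statement) =====
-- stated objective: alternative
-- what changed: Instead of comparing every position pair at every offset, B groups positions by character in one pass (dict of previous occurrences per char) and counts position differences only among equal characters, then reads the per-shift counts out of the difference counter.
import Mathlib
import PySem

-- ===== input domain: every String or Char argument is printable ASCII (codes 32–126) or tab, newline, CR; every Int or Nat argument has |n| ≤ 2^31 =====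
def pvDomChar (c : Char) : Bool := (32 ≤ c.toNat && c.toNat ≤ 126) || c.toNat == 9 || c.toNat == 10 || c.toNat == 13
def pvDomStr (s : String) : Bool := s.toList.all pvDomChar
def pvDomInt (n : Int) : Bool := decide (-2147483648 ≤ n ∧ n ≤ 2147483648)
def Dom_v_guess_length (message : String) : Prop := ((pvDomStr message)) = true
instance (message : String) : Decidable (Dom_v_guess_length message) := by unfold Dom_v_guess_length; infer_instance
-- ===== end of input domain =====

-- B replaces A's per-offset scan by grouping positions by character and counting
-- position differences among occurrences of the same character (alternative
-- algorithm, same worst-case cost).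

-- ===== PORT A =====
def v_guess_length (message : String) : Int × List Int :=
  let n : Int := PySem.Str.len message
  let cycles : List Int :=
    (PySem.List.pyRange 1 n 1).foldl (fun cycles offset =>
      (PySem.List.pyRange 0 (n - offset) 1).foldl (fun cy ii =>
        if PySem.Str.pyGet? message ii == PySem.Str.pyGet? message (offset + ii)
        then cy.dropLast ++ [cy.getLastD 0 + 1] else cy)
      (cycles ++ [0])) [0]
  (((PySem.List.index? cycles ((PySem.List.max? cycles (fun x => x)).getD 0)).getD 0 : Nat),
   cycles)

-- ===== PORT B =====
-- one step of B's loop over enumerate(message): count the differences to the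
-- previous occurrences of this character, then record the new occurrence
def pvStep (st : PySem.Dict Int Int × PySem.Dict Char (List Int)) (p : Int × Char) :
    PySem.Dict Int Int × PySem.Dict Char (List Int) :=
  let prev := st.2.getD p.2 []
  (prev.foldl (fun ds i => ds.insert (p.1 - i) (ds.getD (p.1 - i) 0 + 1)) st.1,
   st.2.insert p.2 (prev ++ [p.1]))

def v_guess_length_alt (message : String) : Int × List Int :=
  let n : Int := PySem.Str.len message
  let st := (PySem.List.enumerate message.toList 0).foldl pvStep
      (PySem.Dict.empty, PySem.Dict.empty)
  let cycles := (PySem.List.pyRange 0 (max n 1) 1).map (fun d => st.1.getD d 0)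
  (((PySem.List.index? cycles ((PySem.List.max? cycles (fun x => x)).getD 0)).getD 0 : Nat),
   cycles)

-- ===== PRECONDITION & SPEC =====
def Spec_v_guess_length (message : String) (out : Int × List Int) : Prop := out = v_guess_length_alt message
instance (message : String) (out : Int × List Int) : Decidable (Spec_v_guess_length message out) := by unfold Spec_v_guess_length; infer_instance

-- ===== CLAIM (what is proved, stated in full; the proofs are below) =====
def Claim_equal_v_guess_length : Prop := ∀ (message : String), Dom_v_guess_length message → Spec_v_guess_length message (v_guess_length message)

-- ===== LEMMAS AND PROOFS =====

-- the previous occurrences of character c in l, as B's `seen` stores them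
def seenVal (l : List Char) (c : Char) : List Int :=
  ((PySem.List.enumerate l 0).filter (fun p => p.2 == c)).map (·.1)

-- the number of coincidences at shift d, indexed by the right end of each pair
def cnt (l : List Char) (d : Int) : Nat :=
  (List.range l.length).countP
    (fun (j : Nat) => decide (1 ≤ d ∧ d ≤ (j : Int)) && (l[j - d.toNat]? == l[j]?))

theorem seenVal_append (l : List Char) (c0 c : Char) :
    seenVal (l ++ [c0]) c
      = seenVal l c ++ if c0 = c then [((l.length : Int))] else [] := by
  simp only [seenVal, PySem.List.enumerate_append, List.filter_append, List.map_append]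
  congr 1
  simp only [PySem.List.enumerate_cons, PySem.List.enumerate_nil]
  by_cases h : c0 = c <;> simp [h]

theorem mem_seenVal (l : List Char) (c : Char) (i : Int) :
    i ∈ seenVal l c ↔ ∃ k : Nat, k < l.length ∧ i = (k : Int) ∧ l[k]? = some c := by
  simp only [seenVal, List.mem_map, List.mem_filter]
  constructor
  · rintro ⟨p, ⟨hp, hc⟩, rfl⟩
    obtain ⟨k, hk, rfl⟩ := (PySem.List.mem_enumerate_iff l 0 p).mp hp
    refine ⟨k, hk, by simp, ?_⟩
    rw [List.getElem?_eq_getElem hk]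
    simpa using hc
  · rintro ⟨k, hk, rfl, hv⟩
    rw [List.getElem?_eq_getElem hk] at hv
    refine ⟨((0 : Int) + (k : Int), l[k]'hk), ⟨?_, ?_⟩, by simp⟩
    · exact (PySem.List.mem_enumerate_iff l 0 _).mpr ⟨k, hk, rfl⟩
    · simpa using hv

theorem nodup_seenVal (l : List Char) (c : Char) : (seenVal l c).Nodup := by
  have h1 : ((PySem.List.enumerate l 0).filter (fun p => p.2 == c)).Pairwise
      (fun p q => p.1 < q.1) :=
    List.Pairwise.filter _ (PySem.List.pairwise_lt_enumerate l 0)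
  have h2 : (seenVal l c).Pairwise (· < ·) := by
    simpa [seenVal, List.pairwise_map] using h1
  exact h2.imp (fun h => ne_of_lt h)

-- B's inner loop: a counting fold over the differences to previous occurrences
theorem getD_foldl_insert_sub (N : Int) (prev : List Int) (ds : PySem.Dict Int Int) (d : Int) :
    (prev.foldl (fun ds i => ds.insert (N - i) (ds.getD (N - i) 0 + 1)) ds).getD d 0
      = ds.getD d 0 + ((prev.map (fun i => N - i)).count d : Int) := by
  induction prev generalizing ds with
  | nil => simp
  | cons x t ih =>
    rw [List.foldl_cons, ih, List.map_cons, List.count_cons, PySem.Dict.getD_insert]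
    by_cases h : d = N - x
    · rw [if_pos h, if_pos (by simp [h]), h]
      push_cast
      ring
    · rw [if_neg h, if_neg (by simp; omega)]
      push_cast
      ring

-- B's diffs counter after the whole loop counts exactly `cnt`
theorem pvFold_spec (l : List Char) :
    (∀ d : Int,
      ((PySem.List.enumerate l 0).foldl pvStep (PySem.Dict.empty, PySem.Dict.empty)).1.getD d 0
        = (cnt l d : Int))
    ∧ (∀ c : Char,
      ((PySem.List.enumerate l 0).foldl pvStep (PySem.Dict.empty, PySem.Dict.empty)).2.getD c []
        = seenVal l c) := by
  induction l using List.reverseRecOn with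
  | nil => constructor <;> intro x <;> simp [PySem.List.enumerate_nil, cnt, seenVal]
  | append_singleton l c0 ih =>
    obtain ⟨ihd, ihs⟩ := ih
    have hfold : (PySem.List.enumerate (l ++ [c0]) 0).foldl pvStep
        (PySem.Dict.empty, PySem.Dict.empty)
        = pvStep ((PySem.List.enumerate l 0).foldl pvStep (PySem.Dict.empty, PySem.Dict.empty))
            ((l.length : Int), c0) := by
      rw [PySem.List.enumerate_append, List.foldl_append]
      simp [PySem.List.enumerate_cons, PySem.List.enumerate_nil]
    rw [hfold]
    set st := (PySem.List.enumerate l 0).foldl pvStep (PySem.Dict.empty, PySem.Dict.empty) with hst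
    constructor
    · intro d
      have hinner : (pvStep st ((l.length : Int), c0)).1.getD d 0
          = st.1.getD d 0 + (((seenVal l c0).map (fun i => (l.length : Int) - i)).count d : Int) := by
        show ((st.2.getD c0 []).foldl
            (fun ds i => ds.insert ((l.length : Int) - i) (ds.getD ((l.length : Int) - i) 0 + 1)) st.1).getD d 0 = _
        rw [ihs c0, getD_foldl_insert_sub]
      rw [hinner, ihd d]
      have hnd : (((seenVal l c0).map (fun i => (l.length : Int) - i))).Nodup := by
        refine (nodup_seenVal l c0).map ?_
        intro a b h
        simp only at h
        omega
      have hmem : d ∈ ((seenVal l c0).map (fun i => (l.length : Int) - i))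
          ↔ (1 ≤ d ∧ d ≤ (l.length : Int) ∧ l[l.length - d.toNat]? = some c0) := by
        rw [List.mem_map]
        constructor
        · rintro ⟨i, hi, rfl⟩
          obtain ⟨k, hk, rfl, hv⟩ := (mem_seenVal l c0 i).mp hi
          refine ⟨by omega, by omega, ?_⟩
          have he : l.length - ((l.length : Int) - (k : Int)).toNat = k := by omega
          rw [he]
          exact hv
        · rintro ⟨h1, h2, hv⟩
          refine ⟨(l.length : Int) - d, ?_, by ring⟩
          exact (mem_seenVal l c0 _).mpr ⟨l.length - d.toNat, by omega, by omega, hv⟩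
      have hcount : (((seenVal l c0).map (fun i => (l.length : Int) - i)).count d : Int)
          = if 1 ≤ d ∧ d ≤ (l.length : Int) ∧ l[l.length - d.toNat]? = some c0 then 1 else 0 := by
        by_cases h : 1 ≤ d ∧ d ≤ (l.length : Int) ∧ l[l.length - d.toNat]? = some c0
        · rw [if_pos h, List.count_eq_one_of_mem hnd (hmem.mpr h)]
          norm_num
        · rw [if_neg h, List.count_eq_zero_of_not_mem (fun hm => h (hmem.mp hm))]
          norm_num
      rw [hcount]
      have hcnt : (cnt (l ++ [c0]) d : Int)
          = (cnt l d : Int)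
            + if 1 ≤ d ∧ d ≤ (l.length : Int) ∧ l[l.length - d.toNat]? = some c0 then 1 else 0 := by
        unfold cnt
        rw [List.length_append, List.length_singleton, List.range_succ, List.countP_append]
        have hcong : (List.range l.length).countP
            (fun (j : Nat) => decide (1 ≤ d ∧ d ≤ (j : Int)) && ((l ++ [c0])[j - d.toNat]? == (l ++ [c0])[j]?))
            = (List.range l.length).countP
            (fun (j : Nat) => decide (1 ≤ d ∧ d ≤ (j : Int)) && (l[j - d.toNat]? == l[j]?)) := by
          apply List.countP_congr
          intro j hj
          rw [List.mem_range] at hj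
          rw [List.getElem?_append_left hj, List.getElem?_append_left (by omega)]
        rw [hcong]
        have hlast : (List.countP
            (fun (j : Nat) => decide (1 ≤ d ∧ d ≤ (j : Int)) && ((l ++ [c0])[j - d.toNat]? == (l ++ [c0])[j]?))
            [l.length] : Nat)
            = if 1 ≤ d ∧ d ≤ (l.length : Int) ∧ l[l.length - d.toNat]? = some c0 then 1 else 0 := by
          rw [List.countP_singleton]
          have hN : (l ++ [c0])[l.length]? = some c0 := by
            simp
          rw [hN]
          by_cases h1 : 1 ≤ d ∧ d ≤ (l.length : Int)
          · have hidx : (l ++ [c0])[l.length - d.toNat]? = l[l.length - d.toNat]? :=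
              List.getElem?_append_left (by omega)
            rw [hidx]
            by_cases h2 : l[l.length - d.toNat]? = some c0
            · simp [h1.1, h1.2, h2]
            · have hb : (l[l.length - d.toNat]? == some c0) = false := by
                simp [h2]
              simp only [h1.1, h1.2, and_true, true_and, decide_true, Bool.true_and, hb]
              simp [h2]
          · have hn : ¬(1 ≤ d ∧ d ≤ (l.length : Int) ∧ l[l.length - d.toNat]? = some c0) := by tauto
            rw [if_neg hn]
            have hd : decide (1 ≤ d ∧ d ≤ ((l.length : Nat) : Int)) = false := by
              simpa using h1
            simp [hd]
        rw [hlast]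
        push_cast
        by_cases h : 1 ≤ d ∧ d ≤ (l.length : Int) ∧ l[l.length - d.toNat]? = some c0 <;>
          simp [h]
      exact hcnt.symm
    · intro c
      show (st.2.insert c0 ((st.2.getD c0 []) ++ [((l.length : Int))])).getD c [] = _
      rw [seenVal_append, PySem.Dict.getD_insert]
      by_cases h : c = c0
      · rw [if_pos h, h, ihs c0, if_pos rfl]
      · rw [if_neg h, ihs c, if_neg (fun hh => h hh.symm), List.append_nil]

theorem pv_getLastD_concat (cy : List Int) (c : Int) : (cy ++ [c]).getLastD 0 = c := by
  simp

-- A's inner loop: incrementing the last cell of `cy ++ [c]` once per match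
theorem foldl_incLast (L : List Int) (p : Int → Bool) (cy : List Int) (c : Int) :
    L.foldl (fun a ii => if p ii then a.dropLast ++ [a.getLastD 0 + 1] else a) (cy ++ [c])
      = cy ++ [c + (L.countP p : Int)] := by
  induction L generalizing c with
  | nil => simp
  | cons x L ih =>
    by_cases h : p x
    · rw [List.foldl_cons, if_pos h, List.dropLast_concat, pv_getLastD_concat, ih (c + 1)]
      have hcp : (((x :: L).countP p : Nat) : Int) = (L.countP p : Int) + 1 := by
        simp [h]
      rw [hcp]
      congr 2
      ring
    · rw [List.foldl_cons, if_neg h, ih c]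
      have hcp : (((x :: L).countP p : Nat) : Int) = (L.countP p : Int) := by
        simp [h]
      rw [hcp]

-- A's cycles list in closed form
theorem cyclesA_eq (message : String) :
    (PySem.List.pyRange 1 (PySem.Str.len message) 1).foldl (fun cycles offset =>
      (PySem.List.pyRange 0 (PySem.Str.len message - offset) 1).foldl (fun cy ii =>
        if PySem.Str.pyGet? message ii == PySem.Str.pyGet? message (offset + ii)
        then cy.dropLast ++ [cy.getLastD 0 + 1] else cy)
      (cycles ++ [0])) [0]
    = [0] ++ (PySem.List.pyRange 1 (PySem.Str.len message) 1).map (fun offset =>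
        (((PySem.List.pyRange 0 (PySem.Str.len message - offset) 1).countP
          (fun ii => PySem.Str.pyGet? message ii == PySem.Str.pyGet? message (offset + ii)) : Nat) : Int)) := by
  have hbody : ∀ (acc : List Int) (offset : Int), offset ∈ PySem.List.pyRange 1 (PySem.Str.len message) 1 →
      (PySem.List.pyRange 0 (PySem.Str.len message - offset) 1).foldl (fun cy ii =>
        if PySem.Str.pyGet? message ii == PySem.Str.pyGet? message (offset + ii)
        then cy.dropLast ++ [cy.getLastD 0 + 1] else cy)
      (acc ++ [0])
      = acc ++ [(((PySem.List.pyRange 0 (PySem.Str.len message - offset) 1).countP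
          (fun ii => PySem.Str.pyGet? message ii == PySem.Str.pyGet? message (offset + ii)) : Nat) : Int)] := by
    intro acc offset _
    rw [foldl_incLast]
    rw [zero_add]
  exact (PySem.List.foldl_congr_mem _ _ _ _ hbody).trans
    (PySem.List.foldl_append_singleton_eq_map _ _ _)

-- each of A's offset counts is `cnt` at that offset
theorem countA_eq_cnt (l : List Char) (o : Nat) (ho1 : 1 ≤ o) (ho2 : o < l.length) :
    (PySem.List.pyRange 0 ((l.length : Int) - (o : Int)) 1).countP
      (fun ii => PySem.List.pyGet? l ii == PySem.List.pyGet? l ((o : Int) + ii))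
    = cnt l (o : Int) := by
  obtain ⟨m, hm⟩ : ∃ m, l.length = o + m := ⟨l.length - o, by omega⟩
  have hio : ((l.length : Int) - (o : Int)) = ((m : Nat) : Int) := by omega
  rw [hio, PySem.List.pyRange_one]
  have ht : ((((m : Nat)) : Int) - 0).toNat = m := by omega
  rw [ht, List.countP_map]
  unfold cnt
  rw [hm, List.range_add, List.countP_append, List.countP_map]
  have hzero : (List.range o).countP
      (fun (j : Nat) => decide (1 ≤ ((o : Nat) : Int) ∧ ((o : Nat) : Int) ≤ (j : Int)) && (l[j - (((o : Nat) : Int)).toNat]? == l[j]?)) = 0 := by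
    rw [List.countP_eq_zero]
    intro j hj
    rw [List.mem_range] at hj
    have hdf : decide (1 ≤ ((o : Nat) : Int) ∧ ((o : Nat) : Int) ≤ (j : Int)) = false := by
      simp only [decide_eq_false_iff_not]
      push Not
      intro _
      omega
    rw [hdf]
    simp
  rw [hzero, Nat.zero_add]
  apply List.countP_congr
  intro k hk
  rw [List.mem_range] at hk
  have hq : ((fun ii => PySem.List.pyGet? l ii == PySem.List.pyGet? l ((o : Int) + ii)) ∘ fun (k : Nat) => (0 : Int) + (k : Int)) k
      = ((fun (j : Nat) => decide (1 ≤ ((o : Nat) : Int) ∧ ((o : Nat) : Int) ≤ (j : Int)) && (l[j - (((o : Nat) : Int)).toNat]? == l[j]?)) ∘ fun (x : Nat) => o + x) k := by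
    simp only [Function.comp_apply]
    have hdt : decide (1 ≤ ((o : Nat) : Int) ∧ ((o : Nat) : Int) ≤ (((o + k : Nat)) : Int)) = true := by
      simp only [decide_eq_true_eq]
      constructor
      · omega
      · push_cast
        omega
    have hg1 : PySem.List.pyGet? l ((0 : Int) + (k : Int)) = l[k]? := by
      rw [zero_add]
      exact_mod_cast PySem.List.pyGet?_natCast l k
    have hg2 : PySem.List.pyGet? l ((o : Int) + ((0 : Int) + (k : Int))) = l[o + k]? := by
      rw [zero_add]
      have hck : (o : Int) + (k : Int) = ((o + k : Nat) : Int) := by push_cast; ring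
      rw [hck]
      exact_mod_cast PySem.List.pyGet?_natCast l (o + k)
    have hidx : (o + k) - (((o : Nat) : Int)).toNat = k := by omega
    rw [hg1, hg2, hdt, hidx, Bool.true_and]
  rw [hq]

-- the two cycles lists coincide
theorem cycles_eq (message : String) :
    [0] ++ (PySem.List.pyRange 1 (PySem.Str.len message) 1).map (fun offset =>
        (((PySem.List.pyRange 0 (PySem.Str.len message - offset) 1).countP
          (fun ii => PySem.Str.pyGet? message ii == PySem.Str.pyGet? message (offset + ii)) : Nat) : Int))
    = (PySem.List.pyRange 0 (max (PySem.Str.len message) 1) 1).map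
        (fun d => ((PySem.List.enumerate message.toList 0).foldl pvStep
          (PySem.Dict.empty, PySem.Dict.empty)).1.getD d 0) := by
  set l := message.toList with hl
  have hlen : PySem.Str.len message = (l.length : Int) := PySem.Str.len_eq message
  have hdiff := (pvFold_spec l).1
  have hcnt0 : cnt l 0 = 0 := by
    unfold cnt
    rw [List.countP_eq_zero]
    intro j hj
    simp
  rw [hlen]
  by_cases h0 : l.length = 0
  · rw [h0]
    have e1 : PySem.List.pyRange 1 (((0 : Nat) : Int)) 1 = [] :=
      PySem.List.pyRange_one_eq_nil (by simp)
    have e2 : max (((0 : Nat) : Int)) 1 = 1 := by simp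
    have e3 : PySem.List.pyRange 0 1 1 = [0] := PySem.List.pyRange_one_singleton 0
    rw [e1, e2, e3, List.map_nil, List.append_nil, List.map_cons, List.map_nil,
      hdiff 0, hcnt0]
    simp
  · have hmax : max ((l.length : Nat) : Int) 1 = (l.length : Int) := by omega
    rw [hmax, PySem.List.pyRange_one_cons (by omega : (0 : Int) < (l.length : Int)), List.map_cons,
      hdiff 0, hcnt0, List.singleton_append,
      (by norm_num : ((0 : Int) + 1) = 1)]
    norm_num
    intro off h1 h2
    obtain ⟨k, rfl⟩ : ∃ k : Nat, off = (k : Int) := ⟨off.toNat, by omega⟩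
    rw [hdiff (k : Int)]
    have hc := countA_eq_cnt l k (by omega) (by omega)
    exact_mod_cast congrArg (fun (x : Nat) => (x : Int)) hc

-- ===== VERDICT (by name: the statement is the Claim_ definition above) =====
theorem v_guess_length_spec : Claim_equal_v_guess_length := by
  intro message _
  show v_guess_length message = v_guess_length_alt message
  simp only [v_guess_length, v_guess_length_alt]
  rw [cyclesA_eq, cycles_eq]
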